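-- pv_equiv track=rewrite | github.com/elemoine/adventofcode | 2024/day21/part2_recursive.py | code_length
-- ===== SOURCE A (Python) =====
-- nkeyp = {c: (i % 3, i // 3) for i, c in enumerate("789456123 0A")}
--
-- dkeyp = {c: (i % 3, i // 3) for i, c in enumerate(" ^A<v>")}
--
-- N = 25
--
-- def moves(keyp, code):
--     x, y = keyp["A"]
--     gx, gy = keyp[" "]
--     for c in code:
--         nx, ny = keyp[c]
--         g = nx == gx and y == gy or x == gx and ny == gy
--         yield (nx - x, ny - y, g)
--         x, y = nx, ny
--
-- def move_code(dx, dy, g):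
--     return ("<" * -dx + "v" * dy + "^" * -dy + ">" * dx)[:: -1 if g else 1] + "A"
--
-- def code_length(code, level=0, cache={}):
--     if level == N + 1:
--         return len(code)
--     k = (code, level)
--     if k in cache:
--         return cache[k]
--     keyp = nkeyp if level == 0 else dkeyp
--     l_ = sum(
--         code_length(move_code(x, y, g), level + 1, cache)
--         for x, y, g in moves(keyp, code)
--     )
--     cache[k] = l_
--     return l_
-- ===== SOURCE B (Python) =====
-- nkeyp = {c: divmod(i, 3)[::-1] for i, c in enumerate("789456123 0A")}
--
-- dkeyp = {c: divmod(i, 3)[::-1] for i, c in enumerate(" ^A<v>")}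
--
-- N = 25
--
-- def _seg(keyp, prev, cur):
--     x, y = keyp[prev]
--     nx, ny = keyp[cur]
--     gx, gy = keyp[" "]
--     s = "<" * (x - nx) + "v" * (ny - y) + "^" * (y - ny) + ">" * (nx - x)
--     if nx == gx and y == gy or x == gx and ny == gy:
--         s = s[::-1]
--     return s + "A"
--
-- def _segments(keyp, code):
--     return [_seg(keyp, prev, cur) for prev, cur in zip("A" + code, code)]
--
-- def code_length(code, level=0, cache={}):
--     # Iterative multiset expansion instead of memoized recursion.
--     if level == N + 1:
--         return len(code)
--     keyp = nkeyp if level == 0 else dkeyp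
--     counts = {}
--     for seg in _segments(keyp, code):
--         counts[seg] = counts.get(seg, 0) + 1
--     for _ in range(level + 1, N + 1):
--         new = {}
--         for seg, c in counts.items():
--             for child in _segments(dkeyp, seg):
--                 new[child] = new.get(child, 0) + c
--         counts = new
--     return sum(len(seg) * c for seg, c in counts.items())
-- ===== Notes on version B (the rewrite author's own statement) =====
-- stated objective: alternative
-- what changed: Replaces the memoized top-down recursion over (segment, level) pairs with an iterative multiset expansion: B builds a dict counting the move-code segments of the input once, then expands the whole multiset one keypad level at a time (child counts accumulate parent counts), and finally returns the sum of len(segment)*count.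
import Mathlib
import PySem

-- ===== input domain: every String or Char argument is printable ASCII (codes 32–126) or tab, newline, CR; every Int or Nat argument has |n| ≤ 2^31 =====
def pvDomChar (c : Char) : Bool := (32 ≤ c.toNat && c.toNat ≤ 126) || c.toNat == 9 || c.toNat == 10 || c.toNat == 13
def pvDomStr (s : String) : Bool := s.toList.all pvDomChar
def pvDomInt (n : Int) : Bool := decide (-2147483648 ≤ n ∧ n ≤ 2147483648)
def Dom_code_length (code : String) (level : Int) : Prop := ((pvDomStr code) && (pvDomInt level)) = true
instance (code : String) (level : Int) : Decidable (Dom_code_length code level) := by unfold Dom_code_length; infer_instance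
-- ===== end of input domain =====

set_option maxRecDepth 10000


-- B replaces A's memoized recursion by an iterative level-by-level multiset expansion (same values; 'alternative', not measured faster).
-- A mutates its default `cache` dict, which persists across calls; that memoization is semantically invisible
-- (the cached values are pure), so each port starts from an empty cache per call.

-- ===== PORT A =====
-- nkeyp = {c: (i % 3, i // 3) for i, c in enumerate("789456123 0A")}
def nkeyp : PySem.Dict Char (Int × Int) :=
  (PySem.List.enumerate "789456123 0A".toList 0).foldl
    (fun d p => d.insert p.2 (PySem.Int.mod p.1 3, PySem.Int.floordiv p.1 3)) PySem.Dict.empty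

-- dkeyp = {c: (i % 3, i // 3) for i, c in enumerate(" ^A<v>")}
def dkeyp : PySem.Dict Char (Int × Int) :=
  (PySem.List.enumerate " ^A<v>".toList 0).foldl
    (fun d p => d.insert p.2 (PySem.Int.mod p.1 3, PySem.Int.floordiv p.1 3)) PySem.Dict.empty

def NN : Int := 25   -- N = 25

-- the loop body of the generator `moves`; `none` = KeyError on keyp[c]
def movesGo (keyp : PySem.Dict Char (Int × Int)) (gx gy : Int) :
    List Char → Int → Int → Option (List (Int × Int × Bool))
  | [], _, _ => some []
  | c :: cs, x, y =>
    match keyp.get? c with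
    | none => none
    | some (nx, ny) =>
      let g : Bool := (nx == gx && y == gy) || (x == gx && ny == gy)
      match movesGo keyp gx gy cs nx ny with
      | none => none
      | some rest => some ((nx - x, ny - y, g) :: rest)

-- list(moves(keyp, code)): the initial lookups keyp["A"], keyp[" "]
def movesAll (keyp : PySem.Dict Char (Int × Int)) (code : List Char) :
    Option (List (Int × Int × Bool)) :=
  match keyp.get? 'A', keyp.get? ' ' with
  | some (x, y), some (gx, gy) => movesGo keyp gx gy code x y
  | _, _ => none

-- move_code: "<"*-dx + "v"*dy + "^"*-dy + ">"*dx, reversed iff g, + "A".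
-- Hand-ported: "c"*n with n ≤ 0 is "" (toNat clamps), [::-1] is reverse, [::1] identity — exact.
def moveCode (dx dy : Int) (g : Bool) : List Char :=
  let s := List.replicate (-dx).toNat '<' ++ List.replicate dy.toNat 'v' ++
           List.replicate (-dy).toNat '^' ++ List.replicate dx.toNat '>'
  (if g then s.reverse else s) ++ ['A']

-- code_length's memoized recursion, with the cache threaded explicitly (Python mutates it in place).
-- The fuel is N + 1 - level: the base case `level == N + 1` is exactly fuel 0.
-- The `none` branch (value 0) is Python's KeyError; fuel 0 with level ≠ N + 1 is Python's
-- RecursionError (level > N + 1) — both are outside Pre_.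
def clAGo : Nat → PySem.Dict (List Char × Int) Int → Int → List Char →
    Int × PySem.Dict (List Char × Int) Int
  | 0, cache, _, code => ((code.length : Int), cache)
  | f + 1, cache, level, code =>
    match cache.get? (code, level) with
    | some v => (v, cache)                               -- if k in cache: return cache[k]
    | none =>
      match movesAll (if level == 0 then nkeyp else dkeyp) code with
      | none => (0, cache)
      | some ms =>
        let r := ms.foldl (fun (acc : Int × PySem.Dict (List Char × Int) Int) m =>
            let vc := clAGo f acc.2 (level + 1) (moveCode m.1 m.2.1 m.2.2)
            (acc.1 + vc.1, vc.2)) ((0 : Int), cache)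
        (r.1, r.2.insert (code, level) r.1)              -- cache[k] = l_

def code_length (code : String) (level : Int) : Int :=
  if level == NN + 1 then (code.toList.length : Int)
  else (clAGo (NN + 1 - level).toNat PySem.Dict.empty level code.toList).1

-- ===== PORT B =====
-- B builds its keypads as {c: divmod(i, 3)[::-1] …}
def nkeypB : PySem.Dict Char (Int × Int) :=
  (PySem.List.enumerate "789456123 0A".toList 0).foldl
    (fun d p =>
      let dm := (PySem.Int.floordiv p.1 3, PySem.Int.mod p.1 3)   -- divmod(i, 3)
      d.insert p.2 (dm.2, dm.1)) PySem.Dict.empty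

def dkeypB : PySem.Dict Char (Int × Int) :=
  (PySem.List.enumerate " ^A<v>".toList 0).foldl
    (fun d p =>
      let dm := (PySem.Int.floordiv p.1 3, PySem.Int.mod p.1 3)
      d.insert p.2 (dm.2, dm.1)) PySem.Dict.empty

-- _seg(keyp, prev, cur); `none` = KeyError on one of the three lookups
def segB (keyp : PySem.Dict Char (Int × Int)) (prev cur : Char) : Option (List Char) :=
  match keyp.get? prev, keyp.get? cur, keyp.get? ' ' with
  | some (x, y), some (nx, ny), some (gx, gy) =>
    let s := List.replicate (x - nx).toNat '<' ++ List.replicate (ny - y).toNat 'v' ++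
             List.replicate (y - ny).toNat '^' ++ List.replicate (nx - x).toNat '>'
    some ((if (nx == gx && y == gy) || (x == gx && ny == gy) then s.reverse else s) ++ ['A'])
  | _, _, _ => none

-- the list comprehension of _segments over zip("A" + code, code)
def segsGo (keyp : PySem.Dict Char (Int × Int)) : List (Char × Char) → Option (List (List Char))
  | [] => some []
  | pc :: rest =>
    match segB keyp pc.1 pc.2, segsGo keyp rest with
    | some s, some t => some (s :: t)
    | _, _ => none

def segmentsB (keyp : PySem.Dict Char (Int × Int)) (code : List Char) :
    Option (List (List Char)) :=
  segsGo keyp (List.zip ('A' :: code) code)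

-- counts[seg] = counts.get(seg, 0) + c for every segment (B's two counting loops share this shape)
def addChild (d : PySem.Dict (List Char) Int) (c : Int) (chs : List (List Char)) :
    PySem.Dict (List Char) Int :=
  chs.foldl (fun d ch => d.insert ch (d.getD ch 0 + c)) d

-- one pass of B's expansion loop; `none` = Python's KeyError (unreachable: every stored segment is over dkeyp)
def stepB (counts : PySem.Dict (List Char) Int) : PySem.Dict (List Char) Int :=
  counts.items.foldl (fun new p =>
    match segmentsB dkeypB p.1 with
    | none => new
    | some chs => addChild new p.2 chs) PySem.Dict.empty

def code_length_alt (code : String) (level : Int) : Int :=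
  if level == NN + 1 then (code.toList.length : Int)
  else
    match segmentsB (if level == 0 then nkeypB else dkeypB) code.toList with
    | none => 0   -- KeyError, outside Pre_
    | some segs =>
      let counts0 := addChild PySem.Dict.empty 1 segs
      let final := (PySem.List.pyRange (level + 1) (NN + 1) 1).foldl (fun cs _ => stepB cs) counts0
      (final.items.map (fun p => ((p.1.length : Int)) * p.2)).sum

-- ===== PRECONDITION & SPEC =====
-- Pre_ excludes exactly the inputs where A raises: KeyError (a character not on that level's keypad,
-- including every negative starting level whose code is not all-'A', where the recursion crosses into the
-- numeric keypad at level 0) and RecursionError (level > N + 1 with a nonempty code). A returns on all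
-- admitted inputs.
def Pre_code_length (code : String) (level : Int) : Prop :=
  level = 26 ∨
  (0 ≤ level ∧ level < 26 ∧ code.toList.all
      (fun c => c ∈ (if level = 0 then "789456123 0A".toList else " ^A<v>".toList)) = true) ∨
  (level < 0 ∧ code.toList.all (fun c => c == 'A') = true) ∨
  (26 < level ∧ code = "")
instance (code : String) (level : Int) : Decidable (Pre_code_length code level) := by
  unfold Pre_code_length; infer_instance

def pvWitness_code_length : String × Int := ("029A", 0)

def Spec_code_length (code : String) (level : Int) (out : Int) : Prop := out = code_length_alt code level
instance (code : String) (level : Int) (out : Int) : Decidable (Spec_code_length code level out) := by unfold Spec_code_length; infer_instance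

-- ===== CLAIM (what is proved, stated in full; the proofs are below) =====
def Claim_equal_code_length : Prop := ∀ (code : String) (level : Int), Dom_code_length code level → Pre_code_length code level → Spec_code_length code level (code_length code level)

-- ===== LEMMAS AND PROOFS =====

-- the cache-free value of A's recursion (proof-side specification of clAGo)
def clSpec : Nat → Int → List Char → Int
  | 0, _, code => (code.length : Int)
  | f + 1, level, code =>
    match movesAll (if level == 0 then nkeyp else dkeyp) code with
    | none => 0
    | some ms => (ms.map (fun m => clSpec f (level + 1) (moveCode m.1 m.2.1 m.2.2))).sum

lemma clSpec_unfold (f : Nat) (level : Int) (cs : List Char)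
    (ms : List (Int × Int × Bool))
    (h : movesAll (if level == 0 then nkeyp else dkeyp) cs = some ms) :
    clSpec (f + 1) level cs
      = (ms.map (fun m => clSpec f (level + 1) (moveCode m.1 m.2.1 m.2.2))).sum := by
  simp only [clSpec, h]

lemma clSpec_none (f : Nat) (level : Int) (cs : List Char)
    (h : movesAll (if level == 0 then nkeyp else dkeyp) cs = none) :
    clSpec (f + 1) level cs = 0 := by
  simp only [clSpec, h]

lemma dict_items_empty {κ ν : Type} [BEq κ] : (PySem.Dict.empty : PySem.Dict κ ν).items = [] := rfl

-- every cache entry records the cache-free value at its own level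
def GoodCache (cache : PySem.Dict (List Char × Int) Int) : Prop :=
  ∀ p v, cache.get? p = some v → v = clSpec (26 - p.2).toNat p.2 p.1

lemma goodCache_empty : GoodCache PySem.Dict.empty := by
  intro p v h
  simp [PySem.Dict.get?_empty] at h

lemma clAGo_spec : ∀ (f : Nat) (level : Int) (cache : PySem.Dict (List Char × Int) Int)
    (code : List Char), GoodCache cache → (f : Int) = 26 - level →
    (clAGo f cache level code).1 = clSpec f level code ∧ GoodCache (clAGo f cache level code).2 := by
  intro f
  induction f with
  | zero => intro level cache code hg _; exact ⟨rfl, hg⟩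
  | succ f ih =>
    intro level cache code hg hf
    have hlf : ((f : Int)) = 26 - (level + 1) := by push_cast at hf ⊢; omega
    have hfl : (26 - level).toNat = f + 1 := by omega
    simp only [clAGo]
    cases hc : cache.get? (code, level) with
    | some v =>
      refine ⟨?_, hg⟩
      have hv := hg (code, level) v hc
      simp only at hv
      rw [hv, hfl]
    | none =>
      cases hm : movesAll (if level == 0 then nkeyp else dkeyp) code with
      | none => exact ⟨by rw [clSpec_none f level code hm], hg⟩
      | some ms =>
        have key : ∀ (ms' : List (Int × Int × Bool)) (a : Int)
            (c : PySem.Dict (List Char × Int) Int), GoodCache c →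
            (ms'.foldl (fun (acc : Int × PySem.Dict (List Char × Int) Int) m =>
                let vc := clAGo f acc.2 (level + 1) (moveCode m.1 m.2.1 m.2.2)
                (acc.1 + vc.1, vc.2)) (a, c)).1
              = a + (ms'.map (fun m => clSpec f (level + 1) (moveCode m.1 m.2.1 m.2.2))).sum ∧
            GoodCache (ms'.foldl (fun (acc : Int × PySem.Dict (List Char × Int) Int) m =>
                let vc := clAGo f acc.2 (level + 1) (moveCode m.1 m.2.1 m.2.2)
                (acc.1 + vc.1, vc.2)) (a, c)).2 := by
          intro ms'
          induction ms' with
          | nil => intro a c hc; exact ⟨by simp, hc⟩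
          | cons m rest ihm =>
            intro a c hc
            obtain ⟨h1, h2⟩ := ih (level + 1) c (moveCode m.1 m.2.1 m.2.2) hc hlf
            simp only [List.foldl_cons]
            obtain ⟨h3, h4⟩ := ihm (a + (clAGo f c (level + 1) (moveCode m.1 m.2.1 m.2.2)).1)
              (clAGo f c (level + 1) (moveCode m.1 m.2.1 m.2.2)).2 h2
            refine ⟨?_, h4⟩
            rw [h3, h1]
            simp [add_assoc]
        obtain ⟨h1, h2⟩ := key ms 0 cache hg
        constructor
        · rw [h1, zero_add, clSpec_unfold f level code ms hm]
        · intro p v hp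
          rw [PySem.Dict.get?_insert] at hp
          by_cases hpe : p = (code, level)
          · rw [if_pos hpe] at hp
            injection hp with hp
            subst hpe
            simp only
            rw [← hp, h1, zero_add, hfl, clSpec_unfold f level code ms hm]
          · rw [if_neg hpe] at hp
            exact h2 p v hp

lemma code_length_eq_clSpec (code : String) (level : Int) (h : level < 26) :
    code_length code level = clSpec (26 - level).toNat level code.toList := by
  have hN : NN + 1 = (26 : Int) := by norm_num [NN]
  have h26 : (level == (26 : Int)) = false := beq_eq_false_iff_ne.mpr (by omega)
  have hf : (((26 - level).toNat : Int)) = 26 - level := by omega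
  simp only [code_length, hN, h26, Bool.false_eq_true, if_false]
  exact (clAGo_spec (26 - level).toNat level PySem.Dict.empty code.toList goodCache_empty hf).1

-- ---- validity of segments over the directional keypad ----

def ValidSeg (s : List Char) : Prop := ∀ c ∈ s, c ∈ " ^A<v>".toList

lemma moveCode_valid (dx dy : Int) (g : Bool) : ValidSeg (moveCode dx dy g) := by
  intro c hc
  simp only [moveCode] at hc
  rcases List.mem_append.mp hc with hc | hc
  · have hs : c ∈ List.replicate (-dx).toNat '<' ++ List.replicate dy.toNat 'v' ++
        List.replicate (-dy).toNat '^' ++ List.replicate dx.toNat '>' := by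
      cases g
      · simpa using hc
      · simp only [if_pos, List.mem_reverse] at hc; simpa using hc
    simp only [List.mem_append, List.mem_replicate] at hs
    rcases hs with ((⟨_, h⟩ | ⟨_, h⟩) | ⟨_, h⟩) | ⟨_, h⟩ <;> subst h <;> decide
  · have : c = 'A' := by simpa using hc
    subst this; decide

lemma movesGo_some (keyp : PySem.Dict Char (Int × Int)) (gx gy : Int) :
    ∀ (cs : List Char) (x y : Int), (∀ c ∈ cs, (keyp.get? c).isSome) →
    ∃ ms, movesGo keyp gx gy cs x y = some ms := by
  intro cs
  induction cs with
  | nil => intro x y _; exact ⟨[], rfl⟩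
  | cons c rest ih =>
    intro x y h
    have h1 : (keyp.get? c).isSome := h c (List.mem_cons_self ..)
    obtain ⟨⟨nx, ny⟩, hnx⟩ := Option.isSome_iff_exists.mp h1
    obtain ⟨ms, hms⟩ := ih nx ny (fun c hc => h c (List.mem_cons_of_mem _ hc))
    exact ⟨(nx - x, ny - y, (nx == gx && y == gy) || (x == gx && ny == gy)) :: ms,
      by simp only [movesGo, hnx, hms]⟩

lemma movesAll_dkeyp_some (cs : List Char) (h : ValidSeg cs) :
    ∃ ms, movesAll dkeyp cs = some ms := by
  have hA : dkeyp.get? 'A' = some (2, 0) := by decide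
  have hS : dkeyp.get? ' ' = some (0, 0) := by decide
  have hlist : " ^A<v>".toList = [' ', '^', 'A', '<', 'v', '>'] := by decide
  have hall : ∀ c ∈ " ^A<v>".toList, (dkeyp.get? c).isSome := by
    intro c hc
    rw [hlist] at hc
    fin_cases hc <;> decide
  simp only [movesAll, hA, hS]
  exact movesGo_some dkeyp 0 0 cs 2 0 (fun c hc => hall c (h c hc))

lemma movesAll_nkeyp_some (cs : List Char) (h : ∀ c ∈ cs, c ∈ "789456123 0A".toList) :
    ∃ ms, movesAll nkeyp cs = some ms := by
  have hA : nkeyp.get? 'A' = some (2, 3) := by decide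
  have hS : nkeyp.get? ' ' = some (0, 3) := by decide
  have hlist : "789456123 0A".toList
      = ['7', '8', '9', '4', '5', '6', '1', '2', '3', ' ', '0', 'A'] := by decide
  have hall : ∀ c ∈ "789456123 0A".toList, (nkeyp.get? c).isSome := by
    intro c hc
    rw [hlist] at hc
    fin_cases hc <;> decide
  simp only [movesAll, hA, hS]
  exact movesGo_some nkeyp 0 3 cs 2 3 (fun c hc => hall c (h c hc))

-- ---- B's keypads and segments agree with A's moves + move_code ----

lemma nkeypB_eq : nkeypB = nkeyp := rfl

lemma dkeypB_eq : dkeypB = dkeyp := rfl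

lemma segB_eq_moveCode (keyp : PySem.Dict Char (Int × Int)) (prev cur : Char)
    (x y nx ny gx gy : Int) (hp : keyp.get? prev = some (x, y))
    (hc : keyp.get? cur = some (nx, ny)) (hS : keyp.get? ' ' = some (gx, gy)) :
    segB keyp prev cur
      = some (moveCode (nx - x) (ny - y) ((nx == gx && y == gy) || (x == gx && ny == gy))) := by
  simp only [segB, hp, hc, hS, moveCode]
  rw [show -(nx - x) = x - nx by ring, show -(ny - y) = y - ny by ring]

lemma segsGo_eq_moves (keyp : PySem.Dict Char (Int × Int)) (gx gy : Int)
    (hS : keyp.get? ' ' = some (gx, gy)) :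
    ∀ (cs : List Char) (p : Char) (x y : Int), keyp.get? p = some (x, y) →
    segsGo keyp (List.zip (p :: cs) cs)
      = (movesGo keyp gx gy cs x y).map (List.map (fun m => moveCode m.1 m.2.1 m.2.2)) := by
  intro cs
  induction cs with
  | nil => intro p x y _; rfl
  | cons c rest ih =>
    intro p x y hp
    simp only [List.zip_cons_cons, segsGo, movesGo]
    cases hc : keyp.get? c with
    | none => simp [segB, hp, hc, hS]
    | some nxy =>
      obtain ⟨nx, ny⟩ := nxy
      rw [segB_eq_moveCode keyp p c x y nx ny gx gy hp hc hS]
      rw [ih c nx ny hc]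
      cases hrec : movesGo keyp gx gy rest nx ny with
      | none => simp [hrec]
      | some ms => simp [hrec]

lemma segmentsB_eq (keyp : PySem.Dict Char (Int × Int)) (gx gy ax ay : Int)
    (hS : keyp.get? ' ' = some (gx, gy)) (hA : keyp.get? 'A' = some (ax, ay)) (cs : List Char) :
    segmentsB keyp cs
      = (movesAll keyp cs).map (List.map (fun m => moveCode m.1 m.2.1 m.2.2)) := by
  rw [segmentsB, segsGo_eq_moves keyp gx gy hS cs 'A' ax ay hA]
  simp only [movesAll, hA, hS]

-- ---- weighted sums over count dictionaries ----

def Wsum (F : List Char → Int) (d : PySem.Dict (List Char) Int) : Int :=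
  (d.items.map (fun p => p.2 * F p.1)).sum

lemma sum_map_replace (F : List Char × Int → Int) (k : List Char) (w v : Int) :
    ∀ (l : List (List Char × Int)), (l.map Prod.fst).Nodup → (k, w) ∈ l →
    ((l.map (fun p => if p.1 == k then (k, v) else p)).map F).sum
      = (l.map F).sum + F (k, v) - F (k, w) := by
  intro l
  induction l with
  | nil => intro _ h; simp at h
  | cons p t ih =>
    intro hn hk
    simp only [List.map_cons, List.nodup_cons] at hn ⊢
    rcases List.mem_cons.mp hk with hk | hk
    · subst hk
      simp only [List.sum_cons]
      have hid : t.map (fun p => if p.1 == k then (k, v) else p) = t := by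
        refine (List.map_congr_left ?_).trans (List.map_id t)
        intro q hq
        have hqk : q.1 ≠ k := by
          intro he
          apply hn.1
          have hmem := List.mem_map_of_mem (f := Prod.fst) hq
          rwa [he] at hmem
        simp [hqk]
      simp only [beq_self_eq_true, if_pos, hid]
      ring
    · have hpk : p.1 ≠ k := by
        intro he
        apply hn.1
        have hmem := List.mem_map_of_mem (f := Prod.fst) hk
        rw [← he] at hmem
        exact hmem
      have hbeq : (p.1 == k) = false := beq_eq_false_iff_ne.mpr hpk
      simp only [List.sum_cons, hbeq, Bool.false_eq_true, if_false]
      rw [ih hn.2 hk]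
      ring

lemma Wsum_insert (F : List Char → Int) (d : PySem.Dict (List Char) Int) (k : List Char)
    (v : Int) (h : d.keys.Nodup) :
    Wsum F (d.insert k v) = Wsum F d + (v - d.getD k 0) * F k := by
  by_cases hc : d.contains k = true
  · have hk : k ∈ d.keys := (PySem.Dict.contains_iff_mem_keys d k).mp hc
    have hk' : k ∈ d.items.map Prod.fst := hk
    have : ∃ w, (k, w) ∈ d.items := by
      obtain ⟨p, hp, hpe⟩ := List.mem_map.mp hk'
      exact ⟨p.2, by rw [← hpe]; simpa using hp⟩
    obtain ⟨w, hw⟩ := this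
    have hgd : d.getD k 0 = w := PySem.Dict.getD_of_mem_items d hw h 0
    rw [Wsum, PySem.Dict.items_insert_of_contains d v hc]
    rw [sum_map_replace (fun p => p.2 * F p.1) k w v d.items h hw]
    simp only [Wsum, hgd]
    ring
  · have hc' : d.contains k = false := by simpa using hc
    rw [Wsum, PySem.Dict.items_insert_of_not_contains d v hc']
    rw [PySem.Dict.getD_of_not_contains d 0 hc']
    simp only [List.map_append, List.sum_append, Wsum]
    simp

lemma nodup_addChild (d : PySem.Dict (List Char) Int) (c : Int)
    (chs : List (List Char)) (h : d.keys.Nodup) : (addChild d c chs).keys.Nodup := by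
  induction chs generalizing d with
  | nil => exact h
  | cons ch rest ih =>
    simp only [addChild, List.foldl_cons]
    exact ih _ (PySem.Dict.nodup_keys_insert d _ _ h)

lemma keys_addChild_sub (d : PySem.Dict (List Char) Int) (c : Int)
    (chs : List (List Char)) :
    ∀ k ∈ (addChild d c chs).keys, k ∈ d.keys ∨ k ∈ chs := by
  induction chs generalizing d with
  | nil => intro k hk; exact Or.inl hk
  | cons ch rest ih =>
    intro k hk
    simp only [addChild, List.foldl_cons] at hk
    rcases ih _ k hk with hk' | hin
    · rcases (PySem.Dict.mem_keys_insert d _ k _).mp hk' with he | hk''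
      · exact Or.inr (he ▸ List.mem_cons_self ..)
      · exact Or.inl hk''
    · exact Or.inr (List.mem_cons_of_mem _ hin)

lemma Wsum_addChild (F : List Char → Int) (d : PySem.Dict (List Char) Int) (c : Int)
    (chs : List (List Char)) (h : d.keys.Nodup) :
    Wsum F (addChild d c chs) = Wsum F d + c * (chs.map F).sum := by
  induction chs generalizing d with
  | nil => simp [addChild]
  | cons ch rest ih =>
    simp only [addChild, List.foldl_cons] at *
    rw [ih _ (PySem.Dict.nodup_keys_insert d _ _ h)]
    rw [Wsum_insert F d _ _ h]
    simp only [List.map_cons, List.sum_cons]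
    ring

-- ---- one expansion step of B resums A's recursion one level deeper ----

lemma segmentsB_dkeyp_some (cs : List Char) (h : ValidSeg cs) :
    ∃ ms, movesAll dkeyp cs = some ms ∧
      segmentsB dkeypB cs = some (ms.map (fun m => moveCode m.1 m.2.1 m.2.2)) := by
  obtain ⟨ms, hm⟩ := movesAll_dkeyp_some cs h
  refine ⟨ms, hm, ?_⟩
  rw [dkeypB_eq, segmentsB_eq dkeyp 0 0 2 0 (by decide) (by decide) cs, hm]
  rfl

lemma nodup_stepB (d : PySem.Dict (List Char) Int) : (stepB d).keys.Nodup := by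
  suffices h : ∀ (l : List (List Char × Int)) (acc : PySem.Dict (List Char) Int), acc.keys.Nodup →
      (l.foldl (fun new p => match segmentsB dkeypB p.1 with
        | none => new
        | some chs => addChild new p.2 chs) acc).keys.Nodup by
    exact h d.items PySem.Dict.empty PySem.Dict.nodup_keys_empty
  intro l
  induction l with
  | nil => intro acc h; exact h
  | cons p t ih =>
    intro acc h
    simp only [List.foldl_cons]
    cases hm : segmentsB dkeypB p.1 with
    | none => simpa [hm] using ih acc h
    | some chs => simpa [hm] using ih _ (nodup_addChild acc p.2 chs h)

lemma keys_stepB_valid (d : PySem.Dict (List Char) Int) :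
    ∀ k ∈ (stepB d).keys, ValidSeg k := by
  suffices h : ∀ (l : List (List Char × Int)) (acc : PySem.Dict (List Char) Int),
      (∀ k ∈ acc.keys, ValidSeg k) →
      ∀ k ∈ (l.foldl (fun new p => match segmentsB dkeypB p.1 with
        | none => new
        | some chs => addChild new p.2 chs) acc).keys, ValidSeg k by
    refine h d.items PySem.Dict.empty ?_
    intro k hk
    rw [PySem.Dict.keys_empty] at hk
    simp at hk
  intro l
  induction l with
  | nil => intro acc h; exact h
  | cons p t ih =>
    intro acc h
    simp only [List.foldl_cons]
    cases hm : segmentsB dkeypB p.1 with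
    | none => simpa [hm] using ih acc h
    | some chs =>
      refine ih _ ?_
      intro k hk
      rcases keys_addChild_sub acc p.2 chs k hk with hk' | hin
      · exact h k hk'
      · -- every child produced by segmentsB over dkeypB is a moveCode image
        rcases hv : segmentsB dkeypB p.1 with _ | chs'
        · rw [hv] at hm; cases hm
        · rw [hv] at hm
          injection hm with hm
          subst hm
          rw [dkeypB_eq, segmentsB_eq dkeyp 0 0 2 0 (by decide) (by decide) p.1] at hv
          cases hmv : movesAll dkeyp p.1 with
          | none => rw [hmv] at hv; cases hv
          | some ms =>
            rw [hmv] at hv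
            injection hv with hv
            rw [← hv] at hin
            obtain ⟨m, _, he⟩ := List.mem_map.mp hin
            exact he ▸ moveCode_valid m.1 m.2.1 m.2.2

lemma stepB_Wsum (f : Nat) (lvl : Int) (hlvl : lvl ≠ 0)
    (d : PySem.Dict (List Char) Int) (hv : ∀ k ∈ d.keys, ValidSeg k) :
    Wsum (clSpec f (lvl + 1)) (stepB d) = Wsum (clSpec (f + 1) lvl) d := by
  have hb : (lvl == (0 : Int)) = false := beq_eq_false_iff_ne.mpr hlvl
  suffices h : ∀ (l : List (List Char × Int)) (acc : PySem.Dict (List Char) Int),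
      (∀ p ∈ l, ValidSeg p.1) → acc.keys.Nodup →
      Wsum (clSpec f (lvl + 1)) (l.foldl (fun new p => match segmentsB dkeypB p.1 with
        | none => new
        | some chs => addChild new p.2 chs) acc)
        = Wsum (clSpec f (lvl + 1)) acc + (l.map (fun p => p.2 * clSpec (f + 1) lvl p.1)).sum by
    have hval : ∀ p ∈ d.items, ValidSeg p.1 :=
      fun p hp => hv p.1 (List.mem_map_of_mem hp)
    have hmain := h d.items PySem.Dict.empty hval PySem.Dict.nodup_keys_empty
    rw [stepB, hmain]
    simp only [Wsum, dict_items_empty, List.map_nil, List.sum_nil, zero_add]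
  intro l
  induction l with
  | nil => intro acc _ _; simp
  | cons p t ih =>
    intro acc hval hnd
    obtain ⟨ms, hm, hsB⟩ := segmentsB_dkeyp_some p.1 (hval p (List.mem_cons_self ..))
    simp only [List.foldl_cons, hsB]
    rw [ih _ (fun q hq => hval q (List.mem_cons_of_mem _ hq)) (nodup_addChild acc p.2 _ hnd)]
    rw [Wsum_addChild _ _ _ _ hnd]
    have hms : movesAll (if lvl == 0 then nkeyp else dkeyp) p.1 = some ms := by
      rw [hb]; simpa using hm
    simp only [List.map_map, Function.comp_def]
    rw [← clSpec_unfold f lvl p.1 ms hms]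
    simp only [List.map_cons, List.sum_cons]
    ring

-- ---- the expansion loop ----

lemma expand_loop : ∀ (n : Nat) (lvl : Int) (d : PySem.Dict (List Char) Int),
    lvl = 26 - (n : Int) → 1 ≤ lvl → (∀ k ∈ d.keys, ValidSeg k) → d.keys.Nodup →
    ((((PySem.List.pyRange lvl 26 1).foldl (fun cs _ => stepB cs) d).items.map
        (fun p => ((p.1.length : Int)) * p.2)).sum)
      = Wsum (clSpec n lvl) d := by
  intro n
  induction n with
  | zero =>
    intro lvl d hl _ _ _
    have : lvl = 26 := by omega
    subst this
    rw [PySem.List.pyRange_one_eq_nil (le_refl 26)]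
    simp only [List.foldl_nil, Wsum, clSpec]
    congr 1
    exact List.map_congr_left (fun p _ => mul_comm _ _)
  | succ n ih =>
    intro lvl d hl h1 hv hnd
    have hlt : lvl < 26 := by omega
    rw [PySem.List.pyRange_one_cons hlt, List.foldl_cons]
    have hl' : lvl + 1 = 26 - (n : Int) := by push_cast at hl ⊢; omega
    rw [ih (lvl + 1) (stepB d) hl' (by omega) (keys_stepB_valid d) (nodup_stepB d)]
    exact stepB_Wsum n lvl (by omega) d hv

-- ---- the all-'A' case (negative starting level) ----

lemma movesGo_repA (keyp : PySem.Dict Char (Int × Int)) (gx gy ax ay : Int)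
    (hA : keyp.get? 'A' = some (ax, ay)) (hg : (ax == gx && ay == gy) = false) :
    ∀ k : Nat, movesGo keyp gx gy (List.replicate k 'A') ax ay
      = some (List.replicate k (((0 : Int), (0 : Int), false))) := by
  intro k
  induction k with
  | zero => rfl
  | succ k ih =>
    simp only [List.replicate_succ, movesGo, hA, ih]
    simp [hg]

lemma clSpec_repA : ∀ (f : Nat) (level : Int) (k : Nat),
    clSpec f level (List.replicate k 'A') = (k : Int) := by
  intro f
  induction f with
  | zero => intro level k; simp [clSpec]
  | succ f ih =>
    intro level k
    have hm : movesAll (if level == 0 then nkeyp else dkeyp) (List.replicate k 'A')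
        = some (List.replicate k (((0 : Int), (0 : Int), false))) := by
      by_cases h0 : level = 0
      · subst h0
        have hA : nkeyp.get? 'A' = some (2, 3) := by decide
        have hS : nkeyp.get? ' ' = some (0, 3) := by decide
        simp only [beq_self_eq_true, if_pos, movesAll, hA, hS]
        exact movesGo_repA nkeyp 0 3 2 3 hA (by decide) k
      · have hb : (level == (0 : Int)) = false := beq_eq_false_iff_ne.mpr h0
        have hA : dkeyp.get? 'A' = some (2, 0) := by decide
        have hS : dkeyp.get? ' ' = some (0, 0) := by decide
        simp only [hb, Bool.false_eq_true, if_false, movesAll, hA, hS]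
        exact movesGo_repA dkeyp 0 0 2 0 hA (by decide) k
    rw [clSpec_unfold f level _ _ hm]
    have hmc : moveCode 0 0 false = ['A'] := by decide
    simp only [List.map_replicate, hmc]
    have h1 : clSpec f (level + 1) ['A'] = 1 := by
      have := ih (level + 1) 1
      simpa using this
    rw [h1, List.sum_replicate]
    simp

lemma foldl_const_fix {α β : Type} (f : α → α) :
    ∀ (l : List β) (d : α), f d = d → l.foldl (fun c _ => f c) d = d := by
  intro l
  induction l with
  | nil => intro d _; rfl
  | cons b t ih => intro d h; simp only [List.foldl_cons, h]; exact ih d h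

lemma segmentsB_repA (k : Nat) :
    segmentsB dkeypB (List.replicate k 'A') = some (List.replicate k ['A']) := by
  have hA : dkeyp.get? 'A' = some (2, 0) := by decide
  rw [dkeypB_eq, segmentsB_eq dkeyp 0 0 2 0 (by decide) hA (List.replicate k 'A')]
  rw [show movesAll dkeyp (List.replicate k 'A')
      = some (List.replicate k (((0 : Int), (0 : Int), false))) by
    simp only [movesAll, hA, show dkeyp.get? ' ' = some (0, 0) by decide]
    exact movesGo_repA dkeyp 0 0 2 0 hA (by decide) k]
  have hmc : moveCode 0 0 false = ['A'] := by decide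
  simp [hmc]

lemma addChild_repA : ∀ (k : Nat) (d : PySem.Dict (List Char) Int),
    addChild d 1 (List.replicate (k + 1) ['A'])
      = d.insert ['A'] (d.getD ['A'] 0 + (k + 1)) := by
  intro k
  induction k with
  | zero =>
    intro d
    simp only [List.replicate_succ, List.replicate_zero, addChild, List.foldl_cons,
      List.foldl_nil]
    norm_num
  | succ k ih =>
    intro d
    have step : addChild d 1 (List.replicate (k + 1 + 1) ['A'])
        = addChild (d.insert ['A'] (d.getD ['A'] 0 + 1)) 1 (List.replicate (k + 1) ['A']) := by
      simp only [List.replicate_succ, addChild, List.foldl_cons]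
    rw [step, ih]
    rw [PySem.Dict.getD_insert_self d, PySem.Dict.insert_insert_self d]
    congr 1
    push_cast
    ring

lemma alt_repA (k : Nat) (level : Int) (hl : level < 0) :
    code_length_alt (String.ofList (List.replicate k 'A')) level = (k : Int) := by
  have hN : NN + 1 = (26 : Int) := by norm_num [NN]
  have h26 : (level == (26 : Int)) = false := beq_eq_false_iff_ne.mpr (by omega)
  have hb : (level == (0 : Int)) = false := beq_eq_false_iff_ne.mpr (by omega)
  have hm : segmentsB (if level == 0 then nkeypB else dkeypB) (List.replicate k 'A')
      = some (List.replicate k ['A']) := by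
    simp only [hb, Bool.false_eq_true, if_false]
    exact segmentsB_repA k
  simp only [code_length_alt, hN, h26, Bool.false_eq_true, if_false, String.toList_ofList, hm]
  have hgd : (PySem.Dict.empty : PySem.Dict (List Char) Int).getD ['A'] 0 = 0 :=
    PySem.Dict.getD_empty _ _
  cases k with
  | zero =>
    have hfix : stepB PySem.Dict.empty = PySem.Dict.empty := by decide
    simp only [List.replicate_zero, addChild, List.foldl_nil]
    rw [foldl_const_fix _ _ _ hfix]
    simp [dict_items_empty]
  | succ k =>
    rw [addChild_repA k PySem.Dict.empty]
    rw [hgd, zero_add]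
    have hitems : ∀ q : Int, ((PySem.Dict.empty : PySem.Dict (List Char) Int).insert ['A'] q).items
        = [(['A'], q)] := by
      intro q
      rw [PySem.Dict.items_insert_of_not_contains _ _ (PySem.Dict.contains_empty _)]
      rw [dict_items_empty, List.nil_append]
    have hfix : ∀ q : Int, stepB ((PySem.Dict.empty : PySem.Dict (List Char) Int).insert ['A'] q)
        = (PySem.Dict.empty : PySem.Dict (List Char) Int).insert ['A'] q := by
      intro q
      rw [stepB, hitems]
      have hmA : segmentsB dkeypB ['A'] = some [['A']] := segmentsB_repA 1
      simp only [List.foldl_cons, List.foldl_nil, hmA]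
      simp only [addChild, List.foldl_cons, List.foldl_nil, hgd, zero_add]
    rw [foldl_const_fix _ _ _ (hfix _), hitems]
    simp

-- ===== VERDICT (by name: the statement is the Claim_ definition above) =====
theorem code_length_spec : Claim_equal_code_length := by
  intro code level _hdom hpre
  show code_length code level = code_length_alt code level
  have hN : NN + 1 = (26 : Int) := by norm_num [NN]
  rcases hpre with h26 | ⟨h0, hlt, hvalb⟩ | ⟨hneg, hAb⟩ | ⟨hgt, hemp⟩
  · subst h26
    simp [code_length, code_length_alt, NN]
  · -- main case: 0 ≤ level < 26, characters on the level's keypad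
    have hval : ∀ c ∈ code.toList,
        c ∈ (if level = 0 then "789456123 0A".toList else " ^A<v>".toList) := by
      simpa using hvalb
    have h26 : (level == (26 : Int)) = false := beq_eq_false_iff_ne.mpr (by omega)
    obtain ⟨ms, hm⟩ : ∃ ms, movesAll (if level == 0 then nkeyp else dkeyp) code.toList = some ms := by
      by_cases h0' : level = 0
      · subst h0'
        simp only [beq_self_eq_true, if_pos]
        exact movesAll_nkeyp_some code.toList (by simpa using hval)
      · have hb : (level == (0 : Int)) = false := beq_eq_false_iff_ne.mpr h0'
        simp only [hb, Bool.false_eq_true, if_false]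
        refine movesAll_dkeyp_some code.toList ?_
        intro c hc
        have := hval c hc
        rwa [if_neg h0'] at this
    have hsB : segmentsB (if level == 0 then nkeypB else dkeypB) code.toList
        = some (ms.map (fun m => moveCode m.1 m.2.1 m.2.2)) := by
      by_cases h0' : level = 0
      · subst h0'
        simp only [beq_self_eq_true, if_pos] at hm ⊢
        rw [nkeypB_eq, segmentsB_eq nkeyp 0 3 2 3 (by decide) (by decide) code.toList, hm]
        rfl
      · have hb : (level == (0 : Int)) = false := beq_eq_false_iff_ne.mpr h0'
        simp only [hb, Bool.false_eq_true, if_false] at hm ⊢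
        rw [dkeypB_eq, segmentsB_eq dkeyp 0 0 2 0 (by decide) (by decide) code.toList, hm]
        rfl
    set n : Nat := (25 - level).toNat with hn
    have hn1 : ((n : Int)) = 25 - level := by omega
    have hsucc : (26 - level).toNat = n + 1 := by omega
    rw [code_length_eq_clSpec code level hlt, hsucc]
    rw [clSpec_unfold n level code.toList ms hm]
    simp only [code_length_alt, hN, h26, Bool.false_eq_true, if_false, hsB]
    have hval0 : ∀ k ∈ (addChild (PySem.Dict.empty : PySem.Dict (List Char) Int) 1
        (ms.map (fun m => moveCode m.1 m.2.1 m.2.2))).keys, ValidSeg k := by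
      intro k hk
      rcases keys_addChild_sub PySem.Dict.empty 1 _ k hk with hk' | hin
      · rw [PySem.Dict.keys_empty] at hk'; simp at hk'
      · obtain ⟨m, _, he⟩ := List.mem_map.mp hin
        exact he ▸ moveCode_valid m.1 m.2.1 m.2.2
    have hnd0 : (addChild (PySem.Dict.empty : PySem.Dict (List Char) Int) 1
        (ms.map (fun m => moveCode m.1 m.2.1 m.2.2))).keys.Nodup :=
      nodup_addChild _ _ _ PySem.Dict.nodup_keys_empty
    rw [expand_loop n (level + 1) _ (by omega) (by omega) hval0 hnd0]
    rw [Wsum_addChild _ _ _ _ PySem.Dict.nodup_keys_empty]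
    simp [Wsum, dict_items_empty, List.map_map, Function.comp_def]
  · -- negative level: code is all-'A'
    have hA : ∀ c ∈ code.toList, c = 'A' := by simpa using hAb
    have hrep : code.toList = List.replicate code.toList.length 'A' :=
      List.eq_replicate_of_mem hA
    have hlt : level < 26 := by omega
    rw [code_length_eq_clSpec code level hlt, hrep, clSpec_repA]
    have hcode : code = String.ofList (List.replicate code.toList.length 'A') := by
      rw [← hrep]; simp
    rw [hcode, alt_repA code.toList.length level hneg]
    simp
  · -- level > 26 with the empty code
    subst hemp
    have h26 : (level == (26 : Int)) = false := beq_eq_false_iff_ne.mpr (by omega)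
    have hb : (level == (0 : Int)) = false := beq_eq_false_iff_ne.mpr (by omega)
    have hz : (26 - level).toNat = 0 := by omega
    have htl : ("" : String).toList = [] := rfl
    have hmB : segmentsB (if level == 0 then nkeypB else dkeypB) ([] : List Char)
        = some [] := by
      simp only [hb, Bool.false_eq_true, if_false]
      rfl
    simp only [code_length, code_length_alt, hN, h26, Bool.false_eq_true, if_false, htl, hz,
      hmB, clAGo]
    rw [PySem.List.pyRange_one_eq_nil (by omega)]
    simp only [List.foldl_nil, addChild, List.foldl_nil]
    simp [dict_items_empty]
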